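-- pv_equiv track=rewrite | github.com/2snchan/roomalloc | Room Assignment.py | convert
-- ===== SOURCE A (Python) =====
-- def convert(roomsM, roomsF):
--     rooms = []
--     for room in roomsM:
--         rooms.append('A' + str(room))
--     for room in roomsF:
--         rooms.append('B' + str(room))
--     rooms.sort()
--     return rooms
-- ===== SOURCE B (Python) =====
-- def convert(roomsM, roomsF):
--     # Sort each gender's room strings separately (without the prefix: prefixing a
--     # common character preserves order), then prefix and concatenate: every
--     # 'A...' string sorts before every 'B...' string, so this equals one global sort.
--     sortedM = sorted(str(room) for room in roomsM)
--     sortedF = sorted(str(room) for room in roomsF)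
--     return ['A' + s for s in sortedM] + ['B' + s for s in sortedF]
-- ===== Notes on version B (the rewrite author's own statement) =====
-- stated objective: alternative
-- what changed: Instead of building one combined prefixed list and globally sorting it, B sorts the un-prefixed room strings of each gender independently, then prefixes and concatenates the two sorted halves, relying on 'A' < 'B' and on prefixing a common character being order-preserving.
import Mathlib
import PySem

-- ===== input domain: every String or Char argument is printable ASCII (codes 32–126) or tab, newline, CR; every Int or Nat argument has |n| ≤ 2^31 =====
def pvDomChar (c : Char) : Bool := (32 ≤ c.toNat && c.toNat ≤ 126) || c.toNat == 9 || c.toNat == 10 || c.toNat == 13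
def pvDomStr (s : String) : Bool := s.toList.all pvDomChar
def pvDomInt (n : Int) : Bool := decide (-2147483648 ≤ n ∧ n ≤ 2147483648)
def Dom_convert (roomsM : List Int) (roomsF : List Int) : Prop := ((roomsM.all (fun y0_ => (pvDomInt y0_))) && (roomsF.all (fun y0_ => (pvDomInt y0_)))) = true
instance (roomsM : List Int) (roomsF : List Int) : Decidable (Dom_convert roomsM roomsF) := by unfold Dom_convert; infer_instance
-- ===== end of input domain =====

-- B sorts each gender's un-prefixed room strings separately, then prefixes and concatenates; alternative decomposition, same result.

-- ===== PORT A =====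
-- 'A' + str(room) is String.ofList ('A' :: PySem.Int.toChars room) — exact char-level concatenation;
-- rooms.sort() is PySem.List.sorted with the identity key (Python str '<' = Lean '<' on String, per PYSEM.md).
def convert (roomsM : List Int) (roomsF : List Int) : List String :=
  let rooms : List String :=
    roomsM.foldl (fun acc room => acc ++ [String.ofList ('A' :: PySem.Int.toChars room)]) []
  let rooms :=
    roomsF.foldl (fun acc room => acc ++ [String.ofList ('B' :: PySem.Int.toChars room)]) rooms
  PySem.List.sorted rooms (fun x => x) false

-- ===== PORT B =====
def convert_alt (roomsM : List Int) (roomsF : List Int) : List String :=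
  let sortedM := PySem.List.sorted (roomsM.map PySem.Int.toStr) (fun s => s) false
  let sortedF := PySem.List.sorted (roomsF.map PySem.Int.toStr) (fun s => s) false
  sortedM.map (fun s => String.ofList ('A' :: s.toList)) ++
    sortedF.map (fun s => String.ofList ('B' :: s.toList))

-- ===== PRECONDITION & SPEC =====
def Spec_convert (roomsM : List Int) (roomsF : List Int) (out : List String) : Prop := out = convert_alt roomsM roomsF
instance (roomsM : List Int) (roomsF : List Int) (out : List String) : Decidable (Spec_convert roomsM roomsF out) := by unfold Spec_convert; infer_instance

-- ===== CLAIM (what is proved, stated in full; the proofs are below) =====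
def Claim_equal_convert : Prop := ∀ (roomsM : List Int) (roomsF : List Int), Dom_convert roomsM roomsF → Spec_convert roomsM roomsF (convert roomsM roomsF)

-- ===== LEMMAS AND PROOFS =====

-- Prefixing a common character is order-preserving on strings.
theorem pvPrefixMono (c : Char) {s t : String} (h : s ≤ t) :
    String.ofList (c :: s.toList) ≤ String.ofList (c :: t.toList) := by
  rw [String.le_iff_toList_le, String.toList_ofList, String.toList_ofList]
  exact List.cons_le_cons c (String.le_iff_toList_le.mp h)

-- Every 'A'-prefixed string is strictly below every 'B'-prefixed one.
theorem pvALtB (s t : List Char) :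
    String.ofList ('A' :: s) < String.ofList ('B' :: t) := by
  rw [String.lt_iff_toList_lt, String.toList_ofList, String.toList_ofList]
  exact List.lex_eq_true_iff_lt.mp rfl

-- Each prefixed sorted half is a permutation of the corresponding half of A's unsorted list.
theorem pvPermHalf (l : List Int) (c : Char) :
    ((PySem.List.sorted (l.map PySem.Int.toStr) (fun s => s) false).map
        (fun s => String.ofList (c :: s.toList))).Perm
      (l.map (fun room => String.ofList (c :: PySem.Int.toChars room))) := by
  refine ((PySem.List.sorted_perm _ _ _).map _).trans ?_
  rw [List.map_map]
  exact List.Perm.of_eq (List.map_congr_left (fun r _ => by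
    simp [Function.comp, PySem.Int.toList_toStr]))

-- B's output is ≤-ordered.
theorem pvPairwiseB (roomsM roomsF : List Int) :
    (((PySem.List.sorted (roomsM.map PySem.Int.toStr) (fun s => s) false).map
        (fun s => String.ofList ('A' :: s.toList)) ++
      (PySem.List.sorted (roomsF.map PySem.Int.toStr) (fun s => s) false).map
        (fun s => String.ofList ('B' :: s.toList)))).Pairwise (· ≤ ·) := by
  rw [List.pairwise_append]
  refine ⟨?_, ?_, ?_⟩
  · exact (PySem.List.sorted_pairwise _ _).map _ (fun a b h => pvPrefixMono 'A' h)
  · exact (PySem.List.sorted_pairwise _ _).map _ (fun a b h => pvPrefixMono 'B' h)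
  · intro a ha b hb
    obtain ⟨s, -, rfl⟩ := List.mem_map.mp ha
    obtain ⟨t, -, rfl⟩ := List.mem_map.mp hb
    exact le_of_lt (pvALtB s.toList t.toList)

-- ===== VERDICT (by name: the statement is the Claim_ definition above) =====
theorem convert_spec : Claim_equal_convert := by
  intro roomsM roomsF _
  unfold Spec_convert convert convert_alt
  simp only [PySem.List.foldl_append_singleton_eq_map, List.nil_append]
  exact PySem.List.sorted_id_eq_of_perm_of_pairwise _ _
    ((pvPermHalf roomsM 'A').append (pvPermHalf roomsF 'B'))
    (pvPairwiseB roomsM roomsF)
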